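-- pv_equiv track=rewrite | github.com/denizakin/agentTest | src/main_refresh_mviews.py | _mv_names
-- ===== SOURCE A (Python) =====
-- from typing import Iterable, List, Sequence, Tuple
--
-- ORDERED_TFS: Tuple[str, ...] = ("5m", "15m", "1h", "4h", "1d", "1w", "1mo")
--
-- def _mv_names(inst_opt: str, tfs: Sequence[str]) -> List[str]:
--     insts: Iterable[str]
--     if inst_opt == "both":
--         insts = ("btc", "eth")
--     else:
--         insts = (inst_opt,)
--
--     # Keep timeframes in canonical order but filter by requested
--     requested = {tf.strip().lower() for tf in tfs}
--     ordered = [tf for tf in ORDERED_TFS if tf in requested]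
--
--     names: List[str] = []
--     for inst in insts:
--         for tf in ordered:
--             names.append(f"mv_candlesticks_{inst}_{tf}")
--     return names
-- ===== SOURCE B (Python) =====
-- from typing import Iterable, List, Sequence, Tuple
--
-- ORDERED_TFS: Tuple[str, ...] = ("5m", "15m", "1h", "4h", "1d", "1w", "1mo")
--
-- def _mv_names(inst_opt: str, tfs: Sequence[str]) -> List[str]:
--     rank = {tf: i for i, tf in enumerate(ORDERED_TFS)}
--     requested = {tf.strip().lower() for tf in tfs}
--     ordered = sorted((tf for tf in requested if tf in rank), key=rank.__getitem__)
--     insts = ("btc", "eth") if inst_opt == "both" else (inst_opt,)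
--     return [f"mv_candlesticks_{inst}_{tf}" for inst in insts for tf in ordered]
-- ===== Notes on version B (the rewrite author's own statement) =====
-- stated objective: alternative
-- what changed: Instead of scanning the canonical ORDERED_TFS list and filtering by membership in the requested set, B builds a rank index {tf: i} once, keeps only requested timeframes that have a rank, sorts them by rank, and emits the names with a single flat comprehension instead of nested append loops.
import Mathlib
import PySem

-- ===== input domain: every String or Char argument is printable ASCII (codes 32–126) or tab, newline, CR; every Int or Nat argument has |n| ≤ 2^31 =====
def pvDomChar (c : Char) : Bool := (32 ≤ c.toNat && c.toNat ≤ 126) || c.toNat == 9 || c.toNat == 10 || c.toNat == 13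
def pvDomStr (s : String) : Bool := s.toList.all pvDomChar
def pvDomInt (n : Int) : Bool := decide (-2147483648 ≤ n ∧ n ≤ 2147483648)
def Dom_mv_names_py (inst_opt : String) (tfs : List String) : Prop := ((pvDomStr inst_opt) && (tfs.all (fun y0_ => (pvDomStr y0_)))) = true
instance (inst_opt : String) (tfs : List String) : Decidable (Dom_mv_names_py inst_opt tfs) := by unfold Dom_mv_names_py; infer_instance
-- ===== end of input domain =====

-- B is an alternative decomposition (rank index + sort-by-rank + flat comprehension) of A's
-- canonical-scan-and-filter; same cost, proved to return identical lists.

-- ===== PORT A =====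
def ORDERED_TFS : List String := ["5m", "15m", "1h", "4h", "1d", "1w", "1mo"]

def mv_names_py (inst_opt : String) (tfs : List String) : List String :=
  let insts : List String := if inst_opt == "both" then ["btc", "eth"] else [inst_opt]
  let requested : PySem.Set String :=
    PySem.Set.ofList (tfs.map (fun tf => PySem.Str.lower (PySem.Str.strip tf)))
  let ordered : List String := ORDERED_TFS.filter (fun tf => PySem.Set.contains requested tf)
  insts.foldl (fun names inst =>
    ordered.foldl (fun names tf => names ++ ["mv_candlesticks_" ++ inst ++ "_" ++ tf]) names) []

-- ===== PORT B =====
-- rank = {tf: i for i, tf in enumerate(ORDERED_TFS)}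
def mvRank : PySem.Dict String Int :=
  (PySem.List.enumerate ORDERED_TFS).foldl (fun d p => PySem.Dict.insert d p.2 p.1) PySem.Dict.empty

def mv_names_py_alt (inst_opt : String) (tfs : List String) : List String :=
  let requested : PySem.Set String :=
    PySem.Set.ofList (tfs.map (fun tf => PySem.Str.lower (PySem.Str.strip tf)))
  let ordered : List String :=
    PySem.List.sorted (requested.filter (fun tf => PySem.Dict.contains mvRank tf))
      (fun tf => PySem.Dict.getD mvRank tf 0)
  let insts : List String := if inst_opt == "both" then ["btc", "eth"] else [inst_opt]
  insts.flatMap (fun inst => ordered.map (fun tf => "mv_candlesticks_" ++ inst ++ "_" ++ tf))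

-- ===== PRECONDITION & SPEC =====
def Spec_mv_names_py (inst_opt : String) (tfs : List String) (out : List String) : Prop := out = mv_names_py_alt inst_opt tfs
instance (inst_opt : String) (tfs : List String) (out : List String) : Decidable (Spec_mv_names_py inst_opt tfs out) := by unfold Spec_mv_names_py; infer_instance

-- ===== CLAIM (what is proved, stated in full; the proofs are below) =====
def Claim_equal_mv_names_py : Prop := ∀ (inst_opt : String) (tfs : List String), Dom_mv_names_py inst_opt tfs → Spec_mv_names_py inst_opt tfs (mv_names_py inst_opt tfs)

-- ===== LEMMAS AND PROOFS =====

-- a string has a rank exactly when it is a canonical timeframe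
-- mvRank evaluated once to its literal association list
theorem mvRank_eq : mvRank = ⟨[("5m", 0), ("15m", 1), ("1h", 2), ("4h", 3), ("1d", 4), ("1w", 5), ("1mo", 6)]⟩ := by
  decide

theorem mem_rank_iff (a : String) : PySem.Dict.contains mvRank a = true ↔ a ∈ ORDERED_TFS := by
  rw [mvRank_eq]
  simp [PySem.Dict.contains, ORDERED_TFS]
  tauto

-- the two "ordered" lists coincide for every deduplicated requested set
theorem ordered_eq (req : PySem.Set String) (hnd : req.Nodup) :
    PySem.List.sorted (req.filter (fun tf => PySem.Dict.contains mvRank tf))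
      (fun tf => PySem.Dict.getD mvRank tf 0)
    = ORDERED_TFS.filter (fun tf => PySem.Set.contains req tf) := by
  apply PySem.List.sorted_eq_of_perm_of_pairwise_lt
  · rw [List.perm_ext_iff_of_nodup ((by decide : ORDERED_TFS.Nodup).filter _) (hnd.filter _)]
    intro a
    simp only [List.mem_filter, mem_rank_iff, PySem.Set.contains, List.contains_iff_mem]
    tauto
  · exact List.Pairwise.filter _ (by decide)

theorem mv_names_py_eq (inst_opt : String) (tfs : List String) :
    mv_names_py inst_opt tfs = mv_names_py_alt inst_opt tfs := by
  simp only [mv_names_py, mv_names_py_alt]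
  rw [ordered_eq _ (PySem.Set.nodup_ofList _)]
  simp only [PySem.List.foldl_append_singleton_eq_map, PySem.List.foldl_append_eq_flatMap,
    List.nil_append]

-- ===== VERDICT (by name: the statement is the Claim_ definition above) =====
theorem mv_names_py_spec : Claim_equal_mv_names_py := by
  intro inst_opt tfs _
  exact mv_names_py_eq inst_opt tfs
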